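-- pv_equiv track=rewrite | github.com/pc5401/my_BOJ | 백준/Silver/2303. 숫자 게임/숫자 게임.py | solve
-- ===== SOURCE A (Python) =====
-- from itertools import combinations
--
-- def best_last_digit(cards):
--     mx = -1
--     for a, b, c in combinations(cards, 3):
--         v = (a + b + c) % 10
--         if v > mx:
--             mx = v
--     return mx
--
-- def solve(players):
--     best_idx = 1
--     best_val = -1
--     for i, cards in enumerate(players, start=1):
--         val = best_last_digit(cards)
--         if val >= best_val:
--             best_val = val
--             best_idx = i
--     return best_idx
-- ===== SOURCE B (Python) =====
-- def _best_last_digit(cards):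
--     cnt = {}
--     for c in cards:
--         r = c % 10
--         cnt[r] = cnt.get(r, 0) + 1
--     best = -1
--     for r1 in range(10):
--         for r2 in range(r1, 10):
--             for r3 in range(r2, 10):
--                 if r1 == r3:
--                     ok = cnt.get(r1, 0) >= 3
--                 elif r1 == r2:
--                     ok = cnt.get(r1, 0) >= 2 and cnt.get(r3, 0) >= 1
--                 elif r2 == r3:
--                     ok = cnt.get(r1, 0) >= 1 and cnt.get(r2, 0) >= 2
--                 else:
--                     ok = cnt.get(r1, 0) >= 1 and cnt.get(r2, 0) >= 1 and cnt.get(r3, 0) >= 1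
--                 if ok:
--                     v = (r1 + r2 + r3) % 10
--                     if v > best:
--                         best = v
--     return best
--
-- def solve(players):
--     vals = [_best_last_digit(cards) for cards in players]
--     if not vals:
--         return 1
--     m = max(vals)
--     return len(vals) - vals[::-1].index(m)
-- ===== Notes on version B (the rewrite author's own statement) =====
-- stated objective: faster
-- what changed: Per player, A scans all C(n,3) 3-card combinations; B counts cards by residue mod 10 once and enumerates only the <=220 sorted residue triples whose multiplicities the counter supports, and the winner is picked as last-index-of-max instead of a running >= argmax.
import Mathlib
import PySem

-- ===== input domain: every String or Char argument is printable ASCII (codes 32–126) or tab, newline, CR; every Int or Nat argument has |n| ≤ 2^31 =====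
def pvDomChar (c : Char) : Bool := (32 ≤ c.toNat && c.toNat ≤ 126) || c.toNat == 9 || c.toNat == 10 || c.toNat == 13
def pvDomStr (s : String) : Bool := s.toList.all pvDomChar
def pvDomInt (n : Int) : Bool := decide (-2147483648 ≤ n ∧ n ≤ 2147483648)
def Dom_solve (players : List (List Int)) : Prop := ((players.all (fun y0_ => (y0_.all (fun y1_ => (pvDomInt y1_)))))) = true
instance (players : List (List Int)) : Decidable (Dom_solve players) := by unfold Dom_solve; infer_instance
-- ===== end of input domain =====

-- B replaces A's O(n^3)-per-player scan of all 3-card combinations by bucketing cards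
-- modulo 10 and enumerating the ≤220 sorted residue triples (objective: faster).

-- ===== PORT A =====
-- best_last_digit: max over all 3-combinations of (a+b+c) % 10, starting from -1
def bestLastDigit (cards : List Int) : Int :=
  (PySem.List.combinations cards 3).foldl
    (fun mx t =>
      match t with
      | [a, b, c] =>
          let v := PySem.Int.mod (a + b + c) 10
          if v > mx then v else mx
      | _ => mx)   -- unreachable: every member of combinations cards 3 has length 3
    (-1)

def solve (players : List (List Int)) : Int :=
  ((PySem.List.enumerate players 1).foldl
    (fun (s : Int × Int) p =>
      let val := bestLastDigit p.2
      if val ≥ s.1 then (val, p.1) else s)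
    (-1, 1)).2

-- ===== PORT B =====
-- residue counter: for c in cards: cnt[c % 10] = cnt.get(c % 10, 0) + 1
def bestLastDigitAlt (cards : List Int) : Int :=
  let cnt : PySem.Dict Int Int :=
    cards.foldl (fun d c =>
      let r := PySem.Int.mod c 10
      d.insert r (d.getD r 0 + 1)) PySem.Dict.empty
  (PySem.List.pyRange 0 10 1).foldl (fun best r1 =>
    (PySem.List.pyRange r1 10 1).foldl (fun best r2 =>
      (PySem.List.pyRange r2 10 1).foldl (fun best r3 =>
        let ok : Bool :=
          if r1 == r3 then cnt.getD r1 0 ≥ 3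
          else if r1 == r2 then cnt.getD r1 0 ≥ 2 && cnt.getD r3 0 ≥ 1
          else if r2 == r3 then cnt.getD r1 0 ≥ 1 && cnt.getD r2 0 ≥ 2
          else cnt.getD r1 0 ≥ 1 && cnt.getD r2 0 ≥ 1 && cnt.getD r3 0 ≥ 1
        if ok then
          let v := PySem.Int.mod (r1 + r2 + r3) 10
          if v > best then v else best
        else best) best) best) (-1)

def solve_alt (players : List (List Int)) : Int :=
  let vals := players.map bestLastDigitAlt
  match vals with
  | [] => 1                       -- if not vals: return 1
  | v :: t =>
    let m := t.foldl max v        -- m = max(vals)  (cf. PySem.List.max?_id_cons)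
    -- vals[::-1] is vals.reverse (PySem.List.slice?_none_none_neg_one);
    -- .index(m) never raises since m ∈ vals, so the .getD 0 default is unreachable
    ((v :: t).length : Int) - ((PySem.List.index? (v :: t).reverse m).getD 0 : Int)

-- ===== PRECONDITION & SPEC =====
def Spec_solve (players : List (List Int)) (out : Int) : Prop := out = solve_alt players
instance (players : List (List Int)) (out : Int) : Decidable (Spec_solve players out) := by unfold Spec_solve; infer_instance

-- ===== CLAIM (what is proved, stated in full; the proofs are below) =====
def Claim_equal_solve : Prop := ∀ (players : List (List Int)), Dom_solve players → Spec_solve players (solve players)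

-- ===== LEMMAS AND PROOFS =====

-- abbreviations used only by the proofs
def md (c : Int) : Int := c % 10
def valsA (cards : List Int) : List Int :=
  (PySem.List.combinations cards 3).map (fun t => t.sum % 10)
def okP (rs : List Int) (r1 r2 r3 : Int) : Bool :=
  if r1 == r3 then (rs.count r1 : Int) ≥ 3
  else if r1 == r2 then (rs.count r1 : Int) ≥ 2 && (rs.count r3 : Int) ≥ 1
  else if r2 == r3 then (rs.count r1 : Int) ≥ 1 && (rs.count r2 : Int) ≥ 2
  else (rs.count r1 : Int) ≥ 1 && (rs.count r2 : Int) ≥ 1 && (rs.count r3 : Int) ≥ 1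
def trips : List (Int × Int × Int) :=
  (PySem.List.pyRange 0 10 1).flatMap (fun r1 =>
    (PySem.List.pyRange r1 10 1).flatMap (fun r2 =>
      (PySem.List.pyRange r2 10 1).map (fun r3 => (r1, r2, r3))))
def valsB (cards : List Int) : List Int :=
  (trips.filter (fun p => okP (cards.map md) p.1 p.2.1 p.2.2)).map
    (fun p => (p.1 + p.2.1 + p.2.2) % 10)

-- max-fold machinery
theorem foldl_max_cofinal (l1 l2 : List Int)
    (h1 : ∀ v ∈ l1, ∃ w ∈ l2, v ≤ w) (h2 : ∀ v ∈ l2, ∃ w ∈ l1, v ≤ w) :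
    l1.foldl max (-1) = l2.foldl max (-1) := by
  have k1 := PySem.List.le_foldl_max l1 (-1)
  have k2 := PySem.List.le_foldl_max l2 (-1)
  apply le_antisymm
  · rcases PySem.List.foldl_max_mem l1 (-1) with h | h
    · rw [h]; exact k2.1
    · obtain ⟨w, hw, hvw⟩ := h1 _ h
      exact le_trans hvw (k2.2 w hw)
  · rcases PySem.List.foldl_max_mem l2 (-1) with h | h
    · rw [h]; exact k1.1
    · obtain ⟨w, hw, hvw⟩ := h2 _ h
      exact le_trans hvw (k1.2 w hw)

-- shape lemmas
theorem bestLastDigit_eq_foldl (cards : List Int) :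
    bestLastDigit cards = (valsA cards).foldl max (-1) := by
  unfold bestLastDigit valsA
  rw [List.foldl_map]
  apply PySem.List.foldl_congr_mem
  intro acc t ht
  obtain ⟨-, hlen⟩ := (PySem.List.mem_combinations_iff _ _ _).1 ht
  obtain ⟨a, b, c, rfl⟩ := List.length_eq_three.1 hlen
  simp only [List.sum_cons, List.sum_nil,
    PySem.Int.mod_eq_emod_of_pos (by norm_num : (0:Int) < 10)]
  split_ifs with h <;> omega

theorem cnt_getD (cards : List Int) (r : Int) :
    (cards.foldl (fun d c =>
      d.insert (PySem.Int.mod c 10) (d.getD (PySem.Int.mod c 10) 0 + 1))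
      (PySem.Dict.empty : PySem.Dict Int Int)).getD r 0
      = ((cards.map md).count r : Int) := by
  have h := List.foldl_map (f := fun c : Int => PySem.Int.mod c 10)
    (g := fun (d : PySem.Dict Int Int) x => d.insert x (d.getD x 0 + 1))
    (l := cards) (init := PySem.Dict.empty)
  beta_reduce at h
  rw [← h]
  rw [PySem.Dict.getD_foldl_insert_add_one]
  have h2 : cards.map (fun c => PySem.Int.mod c 10) = cards.map md := by
    apply List.map_congr_left
    intro c _
    rw [PySem.Int.mod_eq_emod_of_pos (by norm_num : (0:Int) < 10)]; rfl
  simp [PySem.Dict.getD_empty]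
  rfl

theorem bestLastDigitAlt_eq_foldl (cards : List Int) :
    bestLastDigitAlt cards = (valsB cards).foldl max (-1) := by
  unfold bestLastDigitAlt valsB trips
  rw [List.foldl_map, ← PySem.List.foldl_if_eq_foldl_filter, List.foldl_flatMap]
  simp only [List.foldl_flatMap, List.foldl_map, cnt_getD]
  apply PySem.List.foldl_congr_mem
  intro acc1 r1 _
  apply PySem.List.foldl_congr_mem
  intro acc2 r2 _
  apply PySem.List.foldl_congr_mem
  intro acc3 r3 _
  simp only [okP, PySem.Int.mod_eq_emod_of_pos (by norm_num : (0:Int) < 10)]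
  split_ifs <;> omega

-- membership / counting facts
theorem okP_iff_subperm (rs : List Int) (r1 r2 r3 : Int) (h12 : r1 ≤ r2) (h23 : r2 ≤ r3) :
    okP rs r1 r2 r3 = true ↔ [r1, r2, r3].Subperm rs := by
  rw [List.subperm_ext_iff]
  have key : ∀ x, List.count x [r1, r2, r3]
      = (if x = r1 then 1 else 0) + (if x = r2 then 1 else 0) + (if x = r3 then 1 else 0) := by
    intro x
    simp only [List.count_cons, List.count_nil, beq_iff_eq]
    split_ifs <;> omega
  have hP : okP rs r1 r2 r3 = true ↔
      (if r1 = r3 then ((rs.count r1 : Int) ≥ 3)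
       else if r1 = r2 then ((rs.count r1 : Int) ≥ 2 ∧ (rs.count r3 : Int) ≥ 1)
       else if r2 = r3 then ((rs.count r1 : Int) ≥ 1 ∧ (rs.count r2 : Int) ≥ 2)
       else ((rs.count r1 : Int) ≥ 1 ∧ (rs.count r2 : Int) ≥ 1 ∧ (rs.count r3 : Int) ≥ 1)) := by
    unfold okP
    split_ifs <;> simp_all [and_assoc]
  rw [hP, List.forall_mem_cons, List.forall_mem_cons, List.forall_mem_singleton,
    key r1, key r2, key r3]
  by_cases h13 : r1 = r3
  · rw [show r3 = r1 from h13.symm, show r2 = r1 from by omega]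
    split_ifs <;> omega
  · by_cases h12' : r1 = r2
    · rw [show r2 = r1 from h12'.symm]
      split_ifs <;> omega
    · by_cases h23' : r2 = r3
      · rw [show r3 = r2 from h23'.symm]
        split_ifs <;> omega
      · split_ifs <;> omega

theorem mem_trips (p : Int × Int × Int) :
    p ∈ trips ↔ 0 ≤ p.1 ∧ p.1 ≤ p.2.1 ∧ p.2.1 ≤ p.2.2 ∧ p.2.2 < 10 := by
  obtain ⟨r1, r2, r3⟩ := p
  simp only [trips, List.mem_flatMap, List.mem_map, PySem.List.mem_pyRange_one,
    Prod.mk.injEq]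
  constructor
  · rintro ⟨a, ⟨ha1, ha2⟩, b, ⟨hb1, hb2⟩, c, ⟨hc1, hc2⟩, rfl, rfl, rfl⟩
    exact ⟨ha1, hb1, hc1, hc2⟩
  · rintro ⟨h1, h2, h3, h4⟩
    exact ⟨r1, ⟨h1, by omega⟩, r2, ⟨h2, by omega⟩, r3, ⟨h3, h4⟩, rfl, rfl, rfl⟩

-- cofinality in the two directions
theorem valsA_cofinal (cards : List Int) (v : Int) (hv : v ∈ valsA cards) : v ∈ valsB cards := by
  simp only [valsA, List.mem_map] at hv
  obtain ⟨t, ht, rfl⟩ := hv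
  obtain ⟨hsub, hlen⟩ := (PySem.List.mem_combinations_iff _ _ _).1 ht
  obtain ⟨a, b, c, rfl⟩ := List.length_eq_three.1 hlen
  have hperm := PySem.List.sorted_perm [md a, md b, md c] (fun x => x) false
  have hpw := PySem.List.sorted_pairwise [md a, md b, md c] (fun x => x)
  have hlen3 : (PySem.List.sorted [md a, md b, md c] (fun x => x) false).length = 3 :=
    hperm.length_eq.trans rfl
  obtain ⟨r1, r2, r3, hs⟩ := List.length_eq_three.1 hlen3
  rw [hs] at hperm hpw
  simp only [List.pairwise_cons, List.mem_cons, List.not_mem_nil, or_false,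
    List.Pairwise.nil, and_true] at hpw
  have h12 : r1 ≤ r2 := hpw.1 r2 (Or.inl rfl)
  have h23 : r2 ≤ r3 := hpw.2.1 r3 rfl
  have hbnd : ∀ x ∈ [r1, r2, r3], 0 ≤ x ∧ x < 10 := by
    intro x hx
    have hx2 : x ∈ [md a, md b, md c] := hperm.mem_iff.1 hx
    simp only [List.mem_cons, List.not_mem_nil, or_false, md] at hx2
    rcases hx2 with rfl | rfl | rfl <;>
      exact ⟨Int.emod_nonneg _ (by norm_num), Int.emod_lt_of_pos _ (by norm_num)⟩
  have hmap : [md a, md b, md c].Sublist (cards.map md) := by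
    have h := hsub.map md; simpa using h
  have hsp : [r1, r2, r3].Subperm (cards.map md) := ⟨[md a, md b, md c], hperm.symm, hmap⟩
  have hok := (okP_iff_subperm (cards.map md) r1 r2 r3 h12 h23).2 hsp
  simp only [valsB, List.mem_map, List.mem_filter]
  refine ⟨(r1, r2, r3),
    ⟨(mem_trips _).2 ⟨(hbnd r1 (by simp)).1, h12, h23, (hbnd r3 (by simp)).2⟩, hok⟩, ?_⟩
  have hsum := hperm.sum_eq
  simp only [List.sum_cons, List.sum_nil, add_zero, md] at hsum ⊢
  omega

theorem valsB_cofinal (cards : List Int) (v : Int) (hv : v ∈ valsB cards) : v ∈ valsA cards := by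
  simp only [valsB, List.mem_map, List.mem_filter] at hv
  obtain ⟨⟨r1, r2, r3⟩, ⟨htr, hok⟩, rfl⟩ := hv
  obtain ⟨h0, h12, h23, h10⟩ := (mem_trips _).1 htr
  have hsp := (okP_iff_subperm _ _ _ _ h12 h23).1 hok
  obtain ⟨u, hu_perm, hu_sub⟩ := hsp
  obtain ⟨t, ht_sub, rfl⟩ := List.sublist_map_iff.1 hu_sub
  have hlen : t.length = 3 := by
    have h := hu_perm.length_eq; simpa using h
  simp only [valsA, List.mem_map]
  refine ⟨t, (PySem.List.mem_combinations_iff _ _ _).2 ⟨ht_sub, hlen⟩, ?_⟩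
  obtain ⟨a, b, c, rfl⟩ := List.length_eq_three.1 hlen
  have hsum := hu_perm.sum_eq
  simp only [List.map_cons, List.map_nil, List.sum_cons, List.sum_nil, add_zero, md] at hsum ⊢
  omega

theorem best_eq (cards : List Int) : bestLastDigit cards = bestLastDigitAlt cards := by
  rw [bestLastDigit_eq_foldl, bestLastDigitAlt_eq_foldl]
  exact foldl_max_cofinal _ _
    (fun v hv => ⟨v, valsA_cofinal cards v hv, le_refl v⟩)
    (fun v hv => ⟨v, valsB_cofinal cards v hv, le_refl v⟩)

theorem neg_one_le_bestAlt (cards : List Int) : -1 ≤ bestLastDigitAlt cards := by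
  rw [bestLastDigitAlt_eq_foldl]; exact (PySem.List.le_foldl_max _ _).1

-- the outer loop: A's running last-argmax equals B's len - reversed-index-of-max
theorem M_shift (v : Int) (t : List Int) (hv : -1 ≤ v) :
    (v :: t).foldl max (-1) = t.foldl max v := by
  rw [List.foldl_cons, max_eq_right hv]

theorem M_mem (vals : List Int) (hge : ∀ x ∈ vals, -1 ≤ x) (hne : vals ≠ []) :
    vals.foldl max (-1) ∈ vals := by
  rcases PySem.List.foldl_max_mem vals (-1) with h | h
  · obtain ⟨v, t, rfl⟩ := List.exists_cons_of_ne_nil hne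
    rw [List.foldl_cons] at h
    have hle := (PySem.List.le_foldl_max t (max (-1) v)).1
    rw [h] at hle
    have hv := hge v (by simp)
    have hv1 : v = -1 := by omega
    simp [hv1]
    exact PySem.List.foldl_max_mem t (-1)
  · exact h

theorem solve_alt_ne_nil (players : List (List Int)) (hne : players ≠ []) :
    solve_alt players = (players.length : Int) -
      ((PySem.List.index? (players.map bestLastDigitAlt).reverse
          ((players.map bestLastDigitAlt).foldl max (-1))).getD 0 : Int) := by
  obtain ⟨q, ps, rfl⟩ := List.exists_cons_of_ne_nil hne
  unfold solve_alt
  simp only [List.map_cons]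
  rw [M_shift _ _ (neg_one_le_bestAlt q)]
  simp [List.length_map]

theorem outer_eq (players : List (List Int)) :
    ((PySem.List.enumerate players 1).foldl
      (fun (s : Int × Int) p =>
        let val := bestLastDigitAlt p.2
        if val ≥ s.1 then (val, p.1) else s)
      (-1, 1)) =
    ((players.map bestLastDigitAlt).foldl max (-1),
     solve_alt players) := by
  induction players using List.reverseRecOn with
  | nil => simp [solve_alt, PySem.List.enumerate]
  | append_singleton ps p ih =>
    rw [PySem.List.enumerate_append, List.foldl_append, ih]
    have henum : PySem.List.enumerate [p] (1 + (ps.length : Int)) = [(1 + (ps.length : Int), p)] := by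
      simp [PySem.List.enumerate]
    rw [henum, List.foldl_cons, List.foldl_nil]
    have hfst : ((ps ++ [p]).map bestLastDigitAlt).foldl max (-1)
        = max ((ps.map bestLastDigitAlt).foldl max (-1)) (bestLastDigitAlt p) := by
      simp [List.map_append, List.foldl_append]
    by_cases hge : bestLastDigitAlt p ≥ (ps.map bestLastDigitAlt).foldl max (-1)
    · simp only [if_pos hge]
      have hsnd : solve_alt (ps ++ [p]) = 1 + (ps.length : Int) := by
        rw [solve_alt_ne_nil _ (by simp), hfst, max_eq_right hge]
        rw [show ((ps ++ [p]).map bestLastDigitAlt).reverse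
            = bestLastDigitAlt p :: (ps.map bestLastDigitAlt).reverse by
          simp [List.map_append]]
        rw [PySem.List.index?_cons_self]
        simp
        omega
      rw [hsnd, hfst, max_eq_right hge]
    · simp only [if_neg hge]
      have hlt : bestLastDigitAlt p < (ps.map bestLastDigitAlt).foldl max (-1) :=
        lt_of_not_ge hge
      have hvne : ps.map bestLastDigitAlt ≠ [] := by
        intro h0
        rw [h0] at hlt
        simp at hlt
        have hb := neg_one_le_bestAlt p
        omega
      have hpne : ps ≠ [] := by
        intro h0; rw [h0] at hvne; simp at hvne
      have hMmem : (ps.map bestLastDigitAlt).foldl max (-1) ∈ ps.map bestLastDigitAlt :=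
        M_mem _ (by
          intro x hx
          obtain ⟨c, _, rfl⟩ := List.mem_map.1 hx
          exact neg_one_le_bestAlt c) hvne
      obtain ⟨k, hk⟩ := Option.isSome_iff_exists.1
        ((PySem.List.index?_isSome_iff _ _).2 (List.mem_reverse.2 hMmem))
      have hsnd : solve_alt (ps ++ [p]) = solve_alt ps := by
        rw [solve_alt_ne_nil _ (by simp), solve_alt_ne_nil _ hpne, hfst,
          max_eq_left (le_of_lt hlt)]
        rw [show ((ps ++ [p]).map bestLastDigitAlt).reverse
            = bestLastDigitAlt p :: (ps.map bestLastDigitAlt).reverse by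
          simp [List.map_append]]
        rw [PySem.List.index?_cons_of_ne _ (by omega), hk]
        simp
      rw [hsnd, hfst, max_eq_left (le_of_lt hlt)]

-- ===== VERDICT (by name: the statement is the Claim_ definition above) =====
theorem solve_spec : Claim_equal_solve := by
  intro players _
  unfold Spec_solve solve
  have h : (PySem.List.enumerate players 1).foldl
      (fun (s : Int × Int) p =>
        let val := bestLastDigit p.2
        if val ≥ s.1 then (val, p.1) else s) (-1, 1)
      = (PySem.List.enumerate players 1).foldl
      (fun (s : Int × Int) p =>
        let val := bestLastDigitAlt p.2
        if val ≥ s.1 then (val, p.1) else s) (-1, 1) := by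
    apply PySem.List.foldl_congr_mem
    intro acc x _
    simp only [best_eq]
  rw [h, outer_eq]
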